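-- pv_equiv track=rewrite | github.com/rf-iasys/OEIS | OEIS_A293066_A107387.py | A293066
-- ===== SOURCE A (Python) =====
-- def A293066(n):
--     """
--     Returns the first n terms of A293066,
--     number of vertices at level n of PP_(4,5)
--     using the cumulative sum of the deltas.
--     """
--     seq_a = []
--     current = 1
--     k = 2
--
--     # Generate deltas
--     for _ in range(n):
--         seq_a.append(current)
--         k += current - 2
--         current += k
--
--     # Compute cumulative sum to get A293066
--     seq = []
--     total = 0
--     for val in seq_a:
--         total += val
--         seq.append(total)
--
--     return seq
-- ===== SOURCE B (Python) =====
-- def A293066(n):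
--     """First n partial sums via the closed second-order delta recurrence, single fused loop."""
--     if n <= 0:
--         return []
--     if n == 1:
--         return [1]
--     sums = [1, 3]
--     p, q, total = 1, 2, 3
--     for _ in range(n - 2):
--         d = 3 * q - p - 2
--         total += d
--         sums.append(total)
--         p, q = q, d
--     return sums
-- ===== Notes on version B (the rewrite author's own statement) =====
-- stated objective: simpler
-- what changed: Eliminates A's separate delta-list pass and its running k variable: B steps a closed second-order recurrence on the last two deltas (three times the newer minus the older minus a constant) and accumulates the partial sums directly in one fused loop.
import Mathlib
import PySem

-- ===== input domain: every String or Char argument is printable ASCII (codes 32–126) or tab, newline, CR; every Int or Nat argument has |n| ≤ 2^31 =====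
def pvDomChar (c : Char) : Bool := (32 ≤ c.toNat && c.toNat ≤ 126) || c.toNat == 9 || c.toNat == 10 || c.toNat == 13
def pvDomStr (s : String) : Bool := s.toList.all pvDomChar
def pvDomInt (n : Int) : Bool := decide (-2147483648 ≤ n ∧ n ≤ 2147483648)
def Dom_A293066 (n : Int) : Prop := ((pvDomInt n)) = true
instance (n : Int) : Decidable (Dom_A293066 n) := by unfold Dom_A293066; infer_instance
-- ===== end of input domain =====

-- B replaces A's two passes (delta generation with a running k, then cumulative sum)
-- with one fused loop on a closed second-order delta recurrence; objective: simpler.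


-- ===== PORT A =====
-- state: (seq_a, current, k); the loop body of A's first 'for'
def pvStepA (st : List Int × Int × Int) (_ : Int) : List Int × Int × Int :=
  let k' := st.2.2 + (st.2.1 - 2)
  (st.1 ++ [st.2.1], st.2.1 + k', k')

-- state: (seq, total); the loop body of A's cumulative-sum 'for'
def pvStepC (st : List Int × Int) (v : Int) : List Int × Int :=
  (st.1 ++ [st.2 + v], st.2 + v)

def A293066 (n : Int) : List Int :=
  let seq_a := ((PySem.List.pyRange 0 n 1).foldl pvStepA ([], 1, 2)).1
  (seq_a.foldl pvStepC ([], 0)).1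

-- ===== PORT B =====
-- the 'for _ in range(n-2)' loop of Source B, iteration count as fuel
def pvAltGo : Nat → Int → Int → Int → List Int → List Int
  | 0, _, _, _, sums => sums
  | m + 1, p, q, total, sums =>
      let d := 3 * q - p - 2
      pvAltGo m q d (total + d) (sums ++ [total + d])

def A293066_alt (n : Int) : List Int :=
  if n ≤ 0 then []
  else if n = 1 then [1]
  else pvAltGo (n - 2).toNat 1 2 3 [1, 3]

-- ===== PRECONDITION & SPEC =====
def Spec_A293066 (n : Int) (out : List Int) : Prop := out = A293066_alt n
instance (n : Int) (out : List Int) : Decidable (Spec_A293066 n out) := by unfold Spec_A293066; infer_instance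

-- ===== CLAIM (what is proved, stated in full; the proofs are below) =====
def Claim_equal_A293066 : Prop := ∀ (n : Int), Dom_A293066 n → Spec_A293066 n (A293066 n)

-- ===== LEMMAS AND PROOFS =====
-- recursive characterisation of A's delta-generation loop
def pvDeltas : Nat → Int → Int → List Int
  | 0, _, _ => []
  | m + 1, c, k => c :: pvDeltas m (c + (k + (c - 2))) (k + (c - 2))

-- recursive characterisation of A's cumulative-sum loop
def pvCums : List Int → Int → List Int
  | [], _ => []
  | v :: vs, t => (t + v) :: pvCums vs (t + v)

theorem pvFoldA_eq : ∀ (l : List Int) (acc : List Int) (c k : Int),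
    (l.foldl pvStepA (acc, c, k)).1 = acc ++ pvDeltas l.length c k := by
  intro l
  induction l with
  | nil => intro acc c k; simp [pvDeltas]
  | cons x xs ih =>
      intro acc c k
      simp only [List.foldl_cons, pvStepA, List.length_cons, pvDeltas]
      rw [ih]
      simp

theorem pvFoldC_eq : ∀ (l : List Int) (acc : List Int) (t : Int),
    (l.foldl pvStepC (acc, t)).1 = acc ++ pvCums l t := by
  intro l
  induction l with
  | nil => intro acc t; simp [pvCums]
  | cons v vs ih =>
      intro acc t
      simp only [List.foldl_cons, pvStepC, pvCums]
      rw [ih]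
      simp

theorem pvAltGo_eq : ∀ (m : Nat) (p q total : Int) (sums : List Int),
    pvAltGo m p q total sums
      = sums ++ pvCums (pvDeltas m (3 * q - p - 2) (2 * q - p - 2)) total := by
  intro m
  induction m with
  | zero => intro p q total sums; simp [pvAltGo, pvDeltas, pvCums]
  | succ m ih =>
      intro p q total sums
      simp only [pvAltGo, pvDeltas, pvCums]
      rw [ih]
      have h1 : 3 * q - p - 2 + (2 * q - p - 2 + (3 * q - p - 2 - 2))
          = 3 * (3 * q - p - 2) - q - 2 := by ring
      have h2 : 2 * q - p - 2 + (3 * q - p - 2 - 2)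
          = 2 * (3 * q - p - 2) - q - 2 := by ring
      rw [h1, h2]
      simp

-- ===== VERDICT (by name: the statement is the Claim_ definition above) =====
theorem A293066_spec : Claim_equal_A293066 := by
  intro n _
  unfold Spec_A293066 A293066 A293066_alt
  by_cases h : n ≤ 0
  · rw [PySem.List.pyRange_one_eq_nil (by omega)]
    simp [pvFoldC_eq, h]
  · have hlen : (PySem.List.pyRange 0 n 1).length = n.toNat := by
      rw [PySem.List.length_pyRange_one]; omega
    simp only [pvFoldA_eq, pvFoldC_eq, hlen, List.nil_append]
    by_cases h1 : n = 1
    · subst h1; decide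
    · have h2 : n.toNat = (n - 2).toNat + 2 := by omega
      rw [h2, pvAltGo_eq]
      have hn0 : ¬ n ≤ 0 := by omega
      simp only [if_neg hn0, if_neg h1, pvDeltas, pvCums]
      norm_num
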